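-- pv_equiv track=rewrite | github.com/astarsky2016/Myxozoa_supplementary | ONT_methylation_distribution.py | find_sequential_parts
-- ===== SOURCE A (Python) =====
-- def find_sequential_parts(input_list):
--     sequential_parts = []
--     current_part = [input_list[0]]
--
--     for i in range(1, len(input_list)):
--         if input_list[i] == input_list[i - 1] + 1:
--             current_part.append(input_list[i])
--         else:
--             sequential_parts.append(current_part)
--             current_part = [input_list[i]]
--
--     sequential_parts.append(current_part)  # Add the last part
--     GC_count = 0
--     for el in sequential_parts:
--     	if len(el) == 1:
--     		GC_count += 2
--     	else:
--     		GC_count += len(el) + 1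
--     return GC_count
-- ===== SOURCE B (Python) =====
-- def find_sequential_parts(input_list):
--     prev = input_list[0]
--     run_len = 1
--     GC_count = 0
--     for x in input_list[1:]:
--         if x == prev + 1:
--             run_len += 1
--         else:
--             GC_count += 2 if run_len == 1 else run_len + 1
--             run_len = 1
--         prev = x
--     GC_count += 2 if run_len == 1 else run_len + 1
--     return GC_count
-- ===== Notes on version B (the rewrite author's own statement) =====
-- stated objective: simpler
-- what changed: Single pass keeping only the current run length and a running GC accumulator, instead of materialising a list of runs and summing it in a second pass.
import Mathlib
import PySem

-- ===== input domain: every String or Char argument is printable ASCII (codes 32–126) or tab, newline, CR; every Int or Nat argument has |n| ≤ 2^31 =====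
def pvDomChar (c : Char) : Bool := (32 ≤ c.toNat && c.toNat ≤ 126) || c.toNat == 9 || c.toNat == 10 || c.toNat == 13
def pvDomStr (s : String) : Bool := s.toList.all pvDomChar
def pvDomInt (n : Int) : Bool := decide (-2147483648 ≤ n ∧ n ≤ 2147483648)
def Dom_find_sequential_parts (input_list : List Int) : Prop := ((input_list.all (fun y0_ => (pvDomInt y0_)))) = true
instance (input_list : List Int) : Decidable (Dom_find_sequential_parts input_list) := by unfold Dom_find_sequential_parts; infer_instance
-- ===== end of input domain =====

-- B replaces A's two-pass run-list construction by a single pass keeping only the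
-- current run length and a running accumulator (simpler, O(1) extra space).


-- ===== PORT A =====
-- loop over i in range(1, len): state (sequential_parts, current_part, input_list[i-1]);
-- carrying the previous element in the state is the structural form of the index access input_list[i-1].
def stepA (st : List (List Int) × List Int × Int) (x : Int) : List (List Int) × List Int × Int :=
  if x = st.2.2 + 1 then (st.1, st.2.1 ++ [x], x) else (st.1 ++ [st.2.1], [x], x)

def find_sequential_parts (input_list : List Int) : Int :=
  match input_list with
  | [] => 0  -- Python raises IndexError on input_list[0]; excluded by Pre_
  | h :: t =>
    let st := t.foldl stepA ([], [h], h)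
    let sequential_parts := st.1 ++ [st.2.1]
    sequential_parts.foldl
      (fun gc el => if el.length = 1 then gc + 2 else gc + (el.length : Int) + 1) 0

-- ===== PORT B =====
-- single pass over input_list[1:]: state (prev, run_len, GC_count)
def stepB (st : Int × Int × Int) (x : Int) : Int × Int × Int :=
  if x = st.1 + 1 then (x, st.2.1 + 1, st.2.2)
  else (x, 1, st.2.2 + (if st.2.1 = 1 then 2 else st.2.1 + 1))

def find_sequential_parts_alt (input_list : List Int) : Int :=
  match input_list with
  | [] => 0  -- Python raises IndexError on input_list[0]; excluded by Pre_
  | h :: t =>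
    let st := t.foldl stepB (h, 1, 0)
    st.2.2 + (if st.2.1 = 1 then 2 else st.2.1 + 1)

-- ===== PRECONDITION & SPEC =====
-- Python A raises IndexError on the empty list (input_list[0]); B raises there too.
def Pre_find_sequential_parts (input_list : List Int) : Prop := input_list ≠ []
instance (input_list : List Int) : Decidable (Pre_find_sequential_parts input_list) := by
  unfold Pre_find_sequential_parts; infer_instance

def pvWitness_find_sequential_parts : List Int := [1, 2, 5]

def Spec_find_sequential_parts (input_list : List Int) (out : Int) : Prop := out = find_sequential_parts_alt input_list
instance (input_list : List Int) (out : Int) : Decidable (Spec_find_sequential_parts input_list out) := by unfold Spec_find_sequential_parts; infer_instance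

-- ===== CLAIM (what is proved, stated in full; the proofs are below) =====
def Claim_equal_find_sequential_parts : Prop := ∀ (input_list : List Int), Dom_find_sequential_parts input_list → Pre_find_sequential_parts input_list → Spec_find_sequential_parts input_list (find_sequential_parts input_list)

-- ===== LEMMAS AND PROOFS =====

def sumW (a : Int) (l : List (List Int)) : Int :=
  l.foldl (fun gc el => if el.length = 1 then gc + 2 else gc + (el.length : Int) + 1) a

theorem sumW_append (a : Int) (l : List (List Int)) (e : List Int) :
    sumW a (l ++ [e]) = sumW a l + (if e.length = 1 then 2 else (e.length : Int) + 1) := by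
  simp only [sumW, List.foldl_append, List.foldl_cons, List.foldl_nil]
  split_ifs <;> ring

theorem bridge (t : List Int) : ∀ (sp : List (List Int)) (cp : List Int) (prev : Int),
    sumW 0 ((t.foldl stepA (sp, cp, prev)).1 ++ [(t.foldl stepA (sp, cp, prev)).2.1])
      = (t.foldl stepB (prev, (cp.length : Int), sumW 0 sp)).2.2
        + (if (t.foldl stepB (prev, (cp.length : Int), sumW 0 sp)).2.1 = 1 then 2
           else (t.foldl stepB (prev, (cp.length : Int), sumW 0 sp)).2.1 + 1) := by
  induction t with
  | nil =>
    intro sp cp prev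
    simp only [List.foldl_nil, sumW_append]
    have : ((cp.length : Int) = 1) ↔ (cp.length = 1) := by exact_mod_cast Iff.rfl
    split_ifs with h1 h2 h2 <;> simp_all
  | cons x xs ih =>
    intro sp cp prev
    simp only [List.foldl_cons, stepA, stepB]
    by_cases hx : x = prev + 1
    · subst hx
      have := ih sp (cp ++ [prev + 1]) (prev + 1)
      simpa using this
    · simp only [if_neg hx]
      have hc : ((cp.length : Int) = 1) ↔ cp.length = 1 := by exact_mod_cast Iff.rfl
      have key : sumW 0 (sp ++ [cp])
          = sumW 0 sp + (if (cp.length : Int) = 1 then 2 else (cp.length : Int) + 1) := by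
        rw [sumW_append]; simp only [hc]
      have := ih (sp ++ [cp]) [x] x
      rw [key] at this
      simpa using this

-- ===== VERDICT (by name: the statement is the Claim_ definition above) =====
theorem find_sequential_parts_spec : Claim_equal_find_sequential_parts := by
  intro input_list _ hpre
  unfold Spec_find_sequential_parts
  match input_list with
  | [] => exact absurd rfl hpre
  | h :: t =>
    show find_sequential_parts (h :: t) = find_sequential_parts_alt (h :: t)
    simp only [find_sequential_parts, find_sequential_parts_alt]
    have := bridge t [] [h] h
    simpa [sumW] using this
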